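-- pv_equiv track=rewrite | github.com/akiyamalab/kmer-table | tool/src/kmer_table/kmer_table/kmer_table.py | create_kmer_combination_with_gap
-- ===== SOURCE A (Python) =====
-- def create_kmer_combination_with_gap(kmer='AANAAA'):
--     gap_char = 'N'
--     kmer_list = ['']
--     for base in kmer:
--         if base == gap_char:
--             kmer_list = [kmer + 'A' for kmer in kmer_list] + [kmer + 'T' for kmer in kmer_list] + [kmer + 'G' for kmer in kmer_list] + [kmer + 'C' for kmer in kmer_list]
--         else:
--             kmer_list = [kmer + base for kmer in kmer_list]
--     return kmer_list
-- ===== SOURCE B (Python) =====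
-- def create_kmer_combination_with_gap(kmer='AANAAA'):
--     chars = list(kmer)
--     gaps = [i for i in range(len(chars)) if chars[i] == 'N']
--     bases = 'ATGC'
--     out = []
--     for idx in range(4 ** len(gaps)):
--         buf = chars[:]
--         j = 0
--         for pos in gaps:
--             buf[pos] = bases[(idx // 4 ** j) % 4]
--             j += 1
--         out.append(''.join(buf))
--     return out
-- ===== Notes on version B (the rewrite author's own statement) =====
-- stated objective: faster
-- what changed: B records the gap positions once and enumerates all 4^g combinations arithmetically, decoding each index as a base-4 number (first gap = least-significant digit, digit order ATGC) and filling a copy of the template once per output, instead of A's rebuilding (re-copying) every partial string in the list at every character.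
import Mathlib
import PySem

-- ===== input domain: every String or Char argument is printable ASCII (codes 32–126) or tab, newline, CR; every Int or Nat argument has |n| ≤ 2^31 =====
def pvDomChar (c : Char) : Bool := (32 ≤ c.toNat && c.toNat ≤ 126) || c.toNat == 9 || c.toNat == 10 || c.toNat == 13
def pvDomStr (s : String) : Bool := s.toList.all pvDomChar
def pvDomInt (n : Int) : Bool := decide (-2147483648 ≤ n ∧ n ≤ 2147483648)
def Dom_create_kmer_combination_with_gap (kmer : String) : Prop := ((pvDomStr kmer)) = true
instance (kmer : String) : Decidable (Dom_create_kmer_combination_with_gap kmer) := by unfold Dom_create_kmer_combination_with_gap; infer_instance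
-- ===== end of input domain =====

-- B enumerates the 4^g substitutions arithmetically (base-4 index decoding into the
-- recorded gap positions) instead of A's repeated quadrupling of the whole list: an
-- alternative decomposition of the same exact computation.

-- ===== PORT A =====
-- One step of A's loop body (strings as List Char; joined with String.mk at the end).
def stepA (acc : List (List Char)) (c : Char) : List (List Char) :=
  if c = 'N' then
    acc.map (· ++ ['A']) ++ acc.map (· ++ ['T']) ++ acc.map (· ++ ['G']) ++ acc.map (· ++ ['C'])
  else
    acc.map (· ++ [c])

def create_kmer_combination_with_gap (kmer : String) : List String :=
  (kmer.toList.foldl stepA [[]]).map String.mk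

-- ===== PORT B =====
-- gaps = [i for i in range(len(chars)) if chars[i] == 'N']
def gapsOf (chars : List Char) : List Nat :=
  (List.range chars.length).filter (fun i => chars.getD i ' ' = 'N')

-- bases[d] for d = (idx // 4**j) % 4 < 4, so the default is never used
def baseOf (d : Nat) : Char := (['A','T','G','C']).getD d 'A'

-- the inner `for pos in gaps` loop with counter j
def fillLoop (buf : List Char) (gaps : List Nat) (idx j : Nat) : List Char :=
  match gaps with
  | [] => buf
  | p :: rest => fillLoop (buf.set p (baseOf ((idx / 4 ^ j) % 4))) rest idx (j + 1)

def create_kmer_combination_with_gap_alt (kmer : String) : List String :=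
  let chars := kmer.toList
  let gaps := gapsOf chars
  (List.range (4 ^ gaps.length)).map (fun idx => String.mk (fillLoop chars gaps idx 0))

-- ===== PRECONDITION & SPEC =====
def Spec_create_kmer_combination_with_gap (kmer : String) (out : List String) : Prop := out = create_kmer_combination_with_gap_alt kmer
instance (kmer : String) (out : List String) : Decidable (Spec_create_kmer_combination_with_gap kmer out) := by unfold Spec_create_kmer_combination_with_gap; infer_instance

-- ===== CLAIM (what is proved, stated in full; the proofs are below) =====
def Claim_equal_create_kmer_combination_with_gap : Prop := ∀ (kmer : String), Dom_create_kmer_combination_with_gap kmer → Spec_create_kmer_combination_with_gap kmer (create_kmer_combination_with_gap kmer)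

-- ===== LEMMAS AND PROOFS =====

theorem length_fillLoop (gaps : List Nat) (buf : List Char) (idx j : Nat) :
    (fillLoop buf gaps idx j).length = buf.length := by
  induction gaps generalizing buf j with
  | nil => rfl
  | cons p rest ih => simp [fillLoop, ih]

theorem gapsOf_lt (l : List Char) (p : Nat) (hp : p ∈ gapsOf l) : p < l.length := by
  simpa [List.mem_range] using List.mem_of_mem_filter hp

theorem gapsOf_append_single (l : List Char) (c : Char) :
    gapsOf (l ++ [c]) = gapsOf l ++ (if c = 'N' then [l.length] else []) := by
  unfold gapsOf
  have h1 : (l ++ [c]).length = l.length + 1 := by simp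
  rw [h1, List.range_succ, List.filter_append]
  congr 1
  · apply List.filter_congr
    intro i hi
    have hi' : i < l.length := List.mem_range.mp hi
    simp [List.getD_eq_getElem?_getD, List.getElem?_append_left hi']
  · simp only [List.filter, List.getD_eq_getElem?_getD, List.getElem?_concat_length]
    by_cases hc : c = 'N' <;> simp [hc]

theorem fillLoop_append_char (gaps : List Nat) (buf : List Char) (c : Char) (idx j : Nat)
    (h : ∀ p ∈ gaps, p < buf.length) :
    fillLoop (buf ++ [c]) gaps idx j = fillLoop buf gaps idx j ++ [c] := by
  induction gaps generalizing buf j with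
  | nil => rfl
  | cons p rest ih =>
    have hp : p < buf.length := h p (by simp)
    simp only [fillLoop]
    rw [List.set_append, if_pos hp]
    exact ih _ _ (fun q hq => by simpa using h q (by simp [hq]))

theorem fillLoop_snoc_gap (gaps : List Nat) (buf : List Char) (p idx j : Nat) :
    fillLoop buf (gaps ++ [p]) idx j
      = (fillLoop buf gaps idx j).set p (baseOf ((idx / 4 ^ (j + gaps.length)) % 4)) := by
  induction gaps generalizing buf j with
  | nil => simp [fillLoop]
  | cons p0 rest ih =>
    simp only [List.cons_append, fillLoop]
    rw [ih]
    have : j + 1 + rest.length = j + (rest.length + 1) := by omega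
    rw [this]
    rfl

theorem digit_high (q r g j : Nat) (hj : j < g) :
    ((q * 4 ^ g + r) / 4 ^ j) % 4 = (r / 4 ^ j) % 4 := by
  obtain ⟨k, rfl⟩ : ∃ k, g = j + 1 + k := ⟨g - j - 1, by omega⟩
  have h4 : (4 : Nat) ^ (j + 1 + k) = 4 ^ k * 4 * 4 ^ j := by ring
  have hpos : 0 < (4 : Nat) ^ j := pow_pos (by norm_num) j
  calc ((q * 4 ^ (j + 1 + k) + r) / 4 ^ j) % 4
      = ((r + q * 4 ^ k * 4 * 4 ^ j) / 4 ^ j) % 4 := by rw [h4]; ring_nf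
    _ = (r / 4 ^ j + q * 4 ^ k * 4) % 4 := by rw [Nat.add_mul_div_right _ _ hpos]
    _ = (r / 4 ^ j) % 4 := by rw [Nat.add_mul_mod_self_right]

theorem fillLoop_high (gaps : List Nat) (buf : List Char) (q r g j : Nat)
    (h : j + gaps.length ≤ g) :
    fillLoop buf gaps (q * 4 ^ g + r) j = fillLoop buf gaps r j := by
  induction gaps generalizing buf j with
  | nil => rfl
  | cons p rest ih =>
    simp only [fillLoop]
    rw [digit_high q r g j (by simp at h; omega)]
    exact ih _ _ (by simp at h ⊢; omega)

theorem main_eq (l : List Char) :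
    l.foldl stepA [[]]
      = (List.range (4 ^ (gapsOf l).length)).map (fun idx => fillLoop l (gapsOf l) idx 0) := by
  induction l using List.reverseRecOn with
  | nil => rfl
  | append_singleton l c ih =>
    rw [List.foldl_append, List.foldl_cons, List.foldl_nil, ih, gapsOf_append_single]
    by_cases hc : c = 'N'
    · subst hc
      have hm : 0 < 4 ^ (gapsOf l).length := pow_pos (by norm_num) _
      have hG : ∀ idx, fillLoop (l ++ ['N']) (gapsOf l ++ [l.length]) idx 0
          = fillLoop l (gapsOf l) idx 0 ++ [baseOf ((idx / 4 ^ (gapsOf l).length) % 4)] := by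
        intro idx
        rw [fillLoop_snoc_gap, fillLoop_append_char _ _ _ _ _ (gapsOf_lt l)]
        have hlen : (fillLoop l (gapsOf l) idx 0).length = l.length := length_fillLoop ..
        rw [List.set_append, if_neg (by omega)]
        simp [hlen]
      simp only [reduceIte, stepA, List.length_append, List.length_cons,
        List.length_nil, List.map_map]
      have hexp : 4 ^ ((gapsOf l).length + 1)
          = 4 ^ (gapsOf l).length + 4 ^ (gapsOf l).length + 4 ^ (gapsOf l).length
            + 4 ^ (gapsOf l).length := by
        rw [pow_succ]; ring
      rw [hexp, List.range_add, List.range_add, List.range_add, List.map_append,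
        List.map_append, List.map_append, List.map_map, List.map_map, List.map_map]
      have hblock : ∀ (k : Nat), k < 4 → ∀ r ∈ List.range (4 ^ (gapsOf l).length),
          fillLoop (l ++ ['N']) (gapsOf l ++ [l.length]) (k * 4 ^ (gapsOf l).length + r) 0
            = fillLoop l (gapsOf l) r 0 ++ [baseOf k] := by
        intro k hk r hr
        have hr' : r < 4 ^ (gapsOf l).length := List.mem_range.mp hr
        rw [hG, fillLoop_high _ _ _ _ _ _ (by omega)]
        congr 2
        rw [mul_comm, Nat.mul_add_div hm, Nat.div_eq_of_lt hr']
        simp [Nat.mod_eq_of_lt hk]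
      congr 1
      · congr 1
        · congr 1
          · exact List.map_congr_left fun r hr => by
              simpa using (hblock 0 (by norm_num) r hr).symm
          · exact List.map_congr_left fun r hr => by
              simpa [one_mul] using (hblock 1 (by norm_num) r hr).symm
        · exact List.map_congr_left fun r hr => by
            have := (hblock 2 (by norm_num) r hr).symm
            simpa [two_mul] using this
      · exact List.map_congr_left fun r hr => by
          have := (hblock 3 (by norm_num) r hr).symm
          have h3 : 3 * 4 ^ (gapsOf l).length
              = 4 ^ (gapsOf l).length + 4 ^ (gapsOf l).length + 4 ^ (gapsOf l).length := by ring
          simpa [h3] using this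
    · simp only [if_neg hc, List.append_nil, stepA, List.map_map]
      exact List.map_congr_left fun idx _ => by
        simp [Function.comp]
        exact (fillLoop_append_char _ _ _ _ _ (gapsOf_lt l)).symm

-- ===== VERDICT (by name: the statement is the Claim_ definition above) =====
theorem create_kmer_combination_with_gap_spec : Claim_equal_create_kmer_combination_with_gap := by
  intro kmer _
  unfold Spec_create_kmer_combination_with_gap create_kmer_combination_with_gap
    create_kmer_combination_with_gap_alt
  rw [main_eq, List.map_map]
  rfl
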